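-- pv_equiv track=rewrite | github.com/chowonje/knowledge-hub | knowledge_hub/web/ingest.py | _section_by_offset
-- ===== SOURCE A (Python) =====
-- def _section_by_offset(headings: list[tuple[int, list[str], str]], offset: int) -> tuple[str, str]:
--     section_title = ""
--     section_path: list[str] = []
--     for heading_offset, heading_path, heading in headings:
--         if heading_offset <= offset:
--             section_title = heading
--             section_path = heading_path
--         else:
--             break
--
--     return section_title, " > ".join(section_path)
-- ===== SOURCE B (Python) =====
-- def _section_by_offset(headings: list[tuple[int, list[str], str]], offset: int) -> tuple[str, str]:
--     # Binary search for the first heading with offset > target (headings are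
--     # in document order, i.e. sorted by offset); the answer is the entry just
--     # before it, read off with a single lookup (no accumulator overwriting).
--     lo, hi = 0, len(headings)
--     while lo < hi:
--         mid = (lo + hi) // 2
--         if headings[mid][0] <= offset:
--             lo = mid + 1
--         else:
--             hi = mid
--     if lo == 0:
--         return "", ""
--     _, path, title = headings[lo - 1]
--     return title, " > ".join(path)
-- ===== Notes on version B (the rewrite author's own statement) =====
-- stated objective: alternative
-- what changed: A linearly scans headings, overwriting accumulators until the first offset exceeds the target; B binary-searches for the boundary index and reads the answer with a single lookup, valid under Pre_ (headings in document order: no heading with offset <= target after one with offset > target).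
-- outside the precondition, e.g. on _section_by_offset([(5, [], 'b'), (1, ['x'], 'a')], 3): A returns ('', ''), B returns ('a', 'x')
import Mathlib
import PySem

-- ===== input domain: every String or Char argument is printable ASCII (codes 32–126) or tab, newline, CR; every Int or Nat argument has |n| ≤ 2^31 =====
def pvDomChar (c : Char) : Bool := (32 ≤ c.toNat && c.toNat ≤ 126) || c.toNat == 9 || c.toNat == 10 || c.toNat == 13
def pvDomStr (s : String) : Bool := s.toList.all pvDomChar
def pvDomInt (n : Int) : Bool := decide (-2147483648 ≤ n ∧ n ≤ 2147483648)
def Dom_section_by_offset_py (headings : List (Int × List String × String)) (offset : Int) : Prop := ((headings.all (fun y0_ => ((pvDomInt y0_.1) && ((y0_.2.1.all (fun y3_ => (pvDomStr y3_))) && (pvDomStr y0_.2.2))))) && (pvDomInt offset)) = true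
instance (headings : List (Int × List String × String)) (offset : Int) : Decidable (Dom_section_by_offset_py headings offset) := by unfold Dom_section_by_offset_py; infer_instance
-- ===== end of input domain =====

-- B replaces A's linear prefix scan by a binary search for the boundary index;
-- Pre_ states the sortedness (headings in document order) that makes this exact.


-- ===== PORT A =====
-- A: last-write loop — overwrite title/path while heading_offset <= offset, break otherwise.
def pvALoop (offset : Int) : List (Int × List String × String) → String → List String → String × List String
  | [], t, p => (t, p)
  | (ho, hp, h) :: rest, t, p =>
      if ho ≤ offset then pvALoop offset rest h hp else (t, p)

def section_by_offset_py (headings : List (Int × List String × String)) (offset : Int) : String × String :=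
  let r := pvALoop offset headings "" []
  (r.1, PySem.Str.join " > " r.2)

-- ===== PORT B =====
-- B: binary search (lo/hi halving loop) for the first index with offset > target,
-- then one direct lookup at lo-1.  The 'none' arm is a totality guard only
-- (mid < hi ≤ length always holds when the loop recurses).
def pvBSearch (hs : List (Int × List String × String)) (offset : Int) (lo hi : Nat) : Nat :=
  if _h : lo < hi then
    let mid := (lo + hi) / 2
    match hs[mid]? with
    | some (ho, _, _) =>
        if ho ≤ offset then pvBSearch hs offset (mid + 1) hi
        else pvBSearch hs offset lo mid
    | none => lo
  else lo
termination_by hi - lo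
decreasing_by all_goals omega

def section_by_offset_py_alt (headings : List (Int × List String × String)) (offset : Int) : String × String :=
  let lo := pvBSearch headings offset 0 headings.length
  if lo = 0 then ("", "")
  else
    match headings[lo - 1]? with
    | some (_, hp, h) => (h, PySem.Str.join " > " hp)
    | none => ("", "")

-- ===== PRECONDITION & SPEC =====
-- Pre_ excludes lists in which a heading with offset ≤ target comes after one with
-- offset > target: headings come in document order so this never happens, and on such
-- input A's stop-at-first-larger value is an artefact of its early break while B's
-- binary search needs the qualifying headings to form a prefix.
def Pre_section_by_offset_py (headings : List (Int × List String × String)) (offset : Int) : Prop :=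
  List.Pairwise (fun a b => b.1 ≤ offset → a.1 ≤ offset) headings
instance (headings : List (Int × List String × String)) (offset : Int) : Decidable (Pre_section_by_offset_py headings offset) := by unfold Pre_section_by_offset_py; infer_instance

def pvWitness_section_by_offset_py : (List (Int × List String × String)) × Int :=
  ([(1, ["A"], "Intro"), (5, ["A", "B"], "Deep")], 3)

def Spec_section_by_offset_py (headings : List (Int × List String × String)) (offset : Int) (out : String × String) : Prop := out = section_by_offset_py_alt headings offset
instance (headings : List (Int × List String × String)) (offset : Int) (out : String × String) : Decidable (Spec_section_by_offset_py headings offset out) := by unfold Spec_section_by_offset_py; infer_instance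

-- ===== CLAIM (what is proved, stated in full; the proofs are below) =====
def Claim_equal_section_by_offset_py : Prop := ∀ (headings : List (Int × List String × String)) (offset : Int), Dom_section_by_offset_py headings offset → Pre_section_by_offset_py headings offset → Spec_section_by_offset_py headings offset (section_by_offset_py headings offset)

-- ===== LEMMAS AND PROOFS =====

-- The boundary index: length of the leading run with offset ≤ target.
def pvPrefixLen (offset : Int) : List (Int × List String × String) → Nat
  | [] => 0
  | (ho, _, _) :: rest => if ho ≤ offset then pvPrefixLen offset rest + 1 else 0

theorem pvPrefixLen_le_length (offset : Int) (hs : List (Int × List String × String)) :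
    pvPrefixLen offset hs ≤ hs.length := by
  induction hs with
  | nil => simp [pvPrefixLen]
  | cons x rest ih =>
    obtain ⟨ho, hp, h⟩ := x
    simp only [pvPrefixLen, List.length_cons]
    split_ifs <;> omega

-- On sorted input, membership in the leading run is characterised pointwise.
theorem pvPrefixLen_char (offset : Int) (hs : List (Int × List String × String))
    (hs_sorted : List.Pairwise (fun a b => b.1 ≤ offset → a.1 ≤ offset) hs) :
    ∀ i (hi : i < hs.length), (i < pvPrefixLen offset hs ↔ hs[i].1 ≤ offset) := by
  induction hs with
  | nil => intro i hi; simp at hi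
  | cons x rest ih =>
    obtain ⟨ho, hp, h⟩ := x
    rcases List.pairwise_cons.1 hs_sorted with ⟨hhead, hrest⟩
    intro i hi
    cases i with
    | zero =>
      simp only [pvPrefixLen, List.getElem_cons_zero]
      split_ifs with hle
      · simpa using hle
      · simpa using hle
    | succ j =>
      have hj : j < rest.length := by simpa using hi
      simp only [pvPrefixLen, List.getElem_cons_succ]
      split_ifs with hle
      · rw [Nat.succ_lt_succ_iff]; exact ih hrest j hj
      · constructor
        · omega
        · intro hcontra
          exact absurd (hhead rest[j] (List.getElem_mem hj) hcontra) hle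

-- The binary search returns the boundary index whenever it brackets it.
theorem pvBSearch_eq (hs : List (Int × List String × String)) (offset : Int)
    (hs_sorted : List.Pairwise (fun a b => b.1 ≤ offset → a.1 ≤ offset) hs) :
    ∀ lo hi, lo ≤ pvPrefixLen offset hs → pvPrefixLen offset hs ≤ hi → hi ≤ hs.length →
      pvBSearch hs offset lo hi = pvPrefixLen offset hs := by
  intro lo hi
  induction hn : hi - lo using Nat.strong_induction_on generalizing lo hi with
  | _ n ih =>
    intro hlo hhi hlen
    rw [pvBSearch]
    by_cases hlt : lo < hi
    · rw [dif_pos hlt]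
      have hmid : (lo + hi) / 2 < hs.length := by omega
      have hget : hs[(lo + hi) / 2]? = some hs[(lo + hi) / 2] := List.getElem?_eq_getElem hmid
      rcases e : hs[(lo + hi) / 2] with ⟨ho, hp, h⟩
      simp only [hget, e]
      have hchar := pvPrefixLen_char offset hs hs_sorted ((lo + hi) / 2) hmid
      rw [e] at hchar
      split_ifs with hle
      · -- mid element ≤ offset ⇒ mid < prefixLen ⇒ recurse right
        have : (lo + hi) / 2 < pvPrefixLen offset hs := hchar.2 hle
        exact ih (hi - ((lo + hi) / 2 + 1)) (by omega) _ _ rfl (by omega) hhi hlen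
      · -- mid element > offset ⇒ prefixLen ≤ mid ⇒ recurse left
        have : ¬ (lo + hi) / 2 < pvPrefixLen offset hs := fun hc => hle (hchar.1 hc)
        exact ih ((lo + hi) / 2 - lo) (by omega) _ _ rfl hlo (by omega) (by omega)
    · rw [dif_neg hlt]; omega

-- A's loop characterised by the boundary index.
theorem pvALoop_char (offset : Int) (hs : List (Int × List String × String)) :
    ∀ (t : String) (p : List String),
      (pvPrefixLen offset hs = 0 → pvALoop offset hs t p = (t, p)) ∧
      (pvPrefixLen offset hs ≠ 0 →
        ∃ ho hp h, hs[pvPrefixLen offset hs - 1]? = some (ho, hp, h) ∧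
          pvALoop offset hs t p = (h, hp)) := by
  induction hs with
  | nil => intro t p; simp [pvPrefixLen, pvALoop]
  | cons x rest ih =>
    obtain ⟨ho, hp, h⟩ := x
    intro t p
    simp only [pvALoop, pvPrefixLen]
    by_cases hle : ho ≤ offset
    · rw [if_pos hle, if_pos hle]
      constructor
      · intro h0; exact absurd h0 (Nat.succ_ne_zero _)
      · intro _
        by_cases hr : pvPrefixLen offset rest = 0
        · exact ⟨ho, hp, h, by rw [hr]; rfl, (ih h hp).1 hr⟩
        · obtain ⟨ho', hp', h', hget, hloop⟩ := (ih h hp).2 hr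
          refine ⟨ho', hp', h', ?_, hloop⟩
          have h1 : pvPrefixLen offset rest + 1 - 1 = (pvPrefixLen offset rest - 1) + 1 := by omega
          rw [h1, List.getElem?_cons_succ]
          exact hget
    · rw [if_neg hle, if_neg hle]
      exact ⟨fun _ => rfl, fun hne => absurd rfl hne⟩

-- ===== VERDICT (by name: the statement is the Claim_ definition above) =====
theorem section_by_offset_py_spec : Claim_equal_section_by_offset_py := by
  intro headings offset _ hpre
  have hsorted : List.Pairwise (fun a b : Int × List String × String => b.1 ≤ offset → a.1 ≤ offset) headings := hpre
  unfold Spec_section_by_offset_py section_by_offset_py section_by_offset_py_alt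
  have hbs : pvBSearch headings offset 0 headings.length = pvPrefixLen offset headings :=
    pvBSearch_eq headings offset hsorted 0 headings.length (Nat.zero_le _)
      (pvPrefixLen_le_length offset headings) le_rfl
  by_cases h0 : pvPrefixLen offset headings = 0
  · simp [hbs, h0, (pvALoop_char offset headings "" []).1 h0, PySem.Str.join]
  · obtain ⟨ho, hp, h, hget, hloop⟩ := (pvALoop_char offset headings "" []).2 h0
    simp [hbs, h0, hget, hloop]
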